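-- pv_equiv track=rewrite | github.com/xianlinyun/langchainagent | src/app/modules/rag/store/law_vector_store.py | _build_category_hierarchy
-- ===== SOURCE A (Python) =====
-- def _build_category_hierarchy(category: str | None) -> list[str]:
--     """将单个分类路径转换为层级列表。
--
--     例如:
--     - "law/civil/labor" -> ["law", "law/civil", "law/civil/labor"]
--     - "faq" -> ["faq"]
--     """
--
--     if not category:
--         return []
--
--     parts = category.split("/")
--     hierarchy: list[str] = []
--     for i in range(len(parts)):
--         hierarchy.append("/".join(parts[: i + 1]))
--
--     # 去重保序
--     seen: set[str] = set()
--     result: list[str] = []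
--     for item in hierarchy:
--         if item not in seen:
--             seen.add(item)
--             result.append(item)
--     return result
-- ===== SOURCE B (Python) =====
-- def _build_category_hierarchy(category):
--     """Single fold over the segments, threading a running prefix; no dedup pass
--     (consecutive prefixes are strictly longer, hence always distinct)."""
--     if not category:
--         return []
--     parts = category.split("/")
--     prefix = parts[0]
--     result = [prefix]
--     for part in parts[1:]:
--         prefix = prefix + "/" + part
--         result.append(prefix)
--     return result
-- ===== Notes on version B (the rewrite author's own statement) =====
-- stated objective: simpler
-- what changed: Replaces the join-of-every-prefix loop plus the separate set-based dedup pass with one fold that threads a running prefix string through the segments; the dedup pass is dropped entirely because successive prefixes are strictly longer and therefore distinct.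
import Mathlib
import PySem

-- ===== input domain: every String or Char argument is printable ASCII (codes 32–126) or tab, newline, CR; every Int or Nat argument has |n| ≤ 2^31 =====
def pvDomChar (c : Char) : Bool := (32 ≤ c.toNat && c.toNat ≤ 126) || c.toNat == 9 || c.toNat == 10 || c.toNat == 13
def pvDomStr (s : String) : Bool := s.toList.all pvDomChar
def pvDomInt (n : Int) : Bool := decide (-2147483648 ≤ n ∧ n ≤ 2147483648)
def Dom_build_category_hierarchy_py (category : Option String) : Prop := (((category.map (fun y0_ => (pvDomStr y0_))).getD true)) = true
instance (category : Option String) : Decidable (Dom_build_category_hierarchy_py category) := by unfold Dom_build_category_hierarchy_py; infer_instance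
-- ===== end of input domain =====

-- B replaces A's join-every-prefix loop plus set-based dedup pass with a single fold
-- threading a running prefix (simpler; prefixes are strictly lengthening, so dedup is a no-op).


-- ===== PORT A =====
-- strings are handled as List Char via PySem.Chars (exact); the final map String.ofList restores String
def build_category_hierarchy_py (category : Option String) : List String :=
  match category with
  | none => []
  | some s =>
    if s = "" then []
    else
      let parts : List (List Char) := PySem.Chars.splitOn s.toList "/".toList
      let hierarchy : List (List Char) :=
        (PySem.List.pyRange 0 (parts.length : Int) 1).foldl
          (fun h i => h ++ [PySem.Chars.join "/".toList (PySem.List.slice parts none (some (i + 1)))]) []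
      let res :=
        (hierarchy.foldl
          (fun (st : PySem.Set (List Char) × List (List Char)) item =>
            if PySem.Set.contains st.1 item then st
            else (PySem.Set.add st.1 item, st.2 ++ [item]))
          (PySem.Set.empty, [])).2
      res.map String.ofList

-- ===== PORT B =====
def build_category_hierarchy_py_alt (category : Option String) : List String :=
  match category with
  | none => []
  | some s =>
    if s = "" then []
    else
      match PySem.Chars.splitOn s.toList "/".toList with
      | [] => []   -- unreachable (split never yields an empty list); totality guard only
      | p0 :: rest =>
        ((rest.foldl
            (fun (st : List Char × List (List Char)) part =>
              let pre := st.1 ++ "/".toList ++ part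
              (pre, st.2 ++ [pre]))
            (p0, [p0])).2).map String.ofList

-- ===== PRECONDITION & SPEC =====
def Spec_build_category_hierarchy_py (category : Option String) (out : List String) : Prop := out = build_category_hierarchy_py_alt category
instance (category : Option String) (out : List String) : Decidable (Spec_build_category_hierarchy_py category out) := by unfold Spec_build_category_hierarchy_py; infer_instance

-- ===== CLAIM (what is proved, stated in full; the proofs are below) =====
def Claim_equal_build_category_hierarchy_py : Prop := ∀ (category : Option String), Dom_build_category_hierarchy_py category → Spec_build_category_hierarchy_py category (build_category_hierarchy_py category)

-- ===== LEMMAS AND PROOFS =====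

-- the list of running prefixes B produces after the head segment
def prefScan (acc : List Char) : List (List Char) → List (List Char)
  | [] => []
  | p :: ps => (acc ++ "/".toList ++ p) :: prefScan (acc ++ "/".toList ++ p) ps

theorem foldB (l : List (List Char)) (acc : List Char) (res : List (List Char)) :
    (l.foldl (fun (st : List Char × List (List Char)) part =>
        ((st.1 ++ "/".toList ++ part : List Char), st.2 ++ [st.1 ++ "/".toList ++ part]))
      (acc, res)).2 = res ++ prefScan acc l := by
  induction l generalizing acc res with
  | nil => simp [prefScan]
  | cons p ps ih =>
    simp only [List.foldl_cons]
    rw [ih]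
    simp [prefScan]

theorem joinGlue (a b : List Char) (t : List (List Char)) :
    PySem.Chars.join "/".toList ((a ++ "/".toList ++ b) :: t)
      = PySem.Chars.join "/".toList (a :: b :: t) := by
  cases t with
  | nil => simp [PySem.Chars.join_singleton, PySem.Chars.join_cons_cons]
  | cons z t' => simp [PySem.Chars.join_cons_cons, List.append_assoc]

theorem mapRangeJoin (rest : List (List Char)) (p0 : List Char) :
    (List.range (rest.length + 1)).map
        (fun k => PySem.Chars.join "/".toList (p0 :: rest.take k))
      = p0 :: prefScan p0 rest := by
  induction rest generalizing p0 with
  | nil => simp [prefScan, PySem.Chars.join_singleton]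
  | cons p ps ih =>
    rw [List.range_succ_eq_map]
    simp only [List.map_cons, List.map_map, List.take_zero, PySem.Chars.join_singleton]
    refine congrArg (p0 :: ·) ?_
    rw [prefScan, ← ih (p0 ++ "/".toList ++ p)]
    refine List.map_congr_left ?_
    intro k _
    simp only [Function.comp, List.take_succ_cons]
    exact (joinGlue p0 p (ps.take k)).symm

theorem prefScanLt (l : List (List Char)) (acc : List Char) :
    ∀ x ∈ prefScan acc l, acc.length < x.length := by
  induction l generalizing acc with
  | nil => simp [prefScan]
  | cons p ps ih =>
    intro x hx
    rw [prefScan] at hx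
    rcases List.mem_cons.mp hx with h | h
    · subst h; simp
    · have h1 : (acc ++ "/".toList ++ p).length < x.length := ih _ x h
      have h2 : acc.length < (acc ++ "/".toList ++ p).length := by simp
      omega

theorem prefScanNodup (l : List (List Char)) (acc : List Char) :
    (acc :: prefScan acc l).Nodup := by
  induction l generalizing acc with
  | nil => simp [prefScan]
  | cons p ps ih =>
    rw [prefScan]
    refine List.Nodup.cons ?_ (ih _)
    intro hmem
    rcases List.mem_cons.mp hmem with h | h
    · have : acc.length < (acc ++ "/".toList ++ p).length := by simp
      rw [← h] at this; omega
    · have := prefScanLt ps (acc ++ "/".toList ++ p) acc h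
      have h2 : acc.length < (acc ++ "/".toList ++ p).length := by simp
      omega

theorem dedupId (h : List (List Char)) (seen : PySem.Set (List Char)) (res : List (List Char))
    (hnd : h.Nodup) (hout : ∀ x ∈ h, ¬ x ∈ seen) :
    (h.foldl
        (fun (st : PySem.Set (List Char) × List (List Char)) item =>
          if PySem.Set.contains st.1 item then st
          else (PySem.Set.add st.1 item, st.2 ++ [item]))
      (seen, res)).2 = res ++ h := by
  induction h generalizing seen res with
  | nil => simp
  | cons x xs ih =>
    have hx : ¬ x ∈ seen := hout x (by simp)
    have hc : PySem.Set.contains seen x = false := by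
      by_contra hcc
      exact hx ((PySem.Set.contains_iff seen x).mp (by simpa using hcc))
    simp only [List.foldl_cons, hc, Bool.false_eq_true, if_false]
    rw [ih (PySem.Set.add seen x) (res ++ [x]) hnd.of_cons ?_]
    · simp
    · intro y hy hmem
      rcases (PySem.Set.mem_add seen x y).mp hmem with h1 | h2
      · exact hout y (by simp [hy]) h1
      · subst h2; exact (List.nodup_cons.mp hnd).1 hy

theorem build_category_hierarchy_py_eq (category : Option String) :
    build_category_hierarchy_py category = build_category_hierarchy_py_alt category := by
  cases category with
  | none => rfl
  | some s =>
    unfold build_category_hierarchy_py build_category_hierarchy_py_alt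
    by_cases hs : s = ""
    · simp [hs]
    · simp only [hs, if_false]
      cases hp : PySem.Chars.splitOn s.toList "/".toList with
      | nil => simp
      | cons p0 rest =>
        simp only
        have hmap :
            ((PySem.List.pyRange 0 ((p0 :: rest).length : Int) 1).foldl
              (fun h i => h ++ [PySem.Chars.join "/".toList
                (PySem.List.slice (p0 :: rest) none (some (i + 1)))]) [])
            = p0 :: prefScan p0 rest := by
          rw [PySem.List.foldl_append_singleton_eq_map,
            PySem.List.pyRange_zero_natCast (p0 :: rest).length]
          simp only [List.nil_append, List.map_map, List.length_cons]
          rw [← mapRangeJoin rest p0]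
          refine List.map_congr_left ?_
          intro k _
          have hcast : ((k : Int) + 1) = ((k + 1 : Nat) : Int) := by push_cast; ring
          simp only [Function.comp, hcast, PySem.List.slice_to_natCast, List.take_succ_cons]
        rw [hmap, dedupId _ _ _ (prefScanNodup rest p0)
          (by intro x _ hx; simp [PySem.Set.empty] at hx), foldB]
        simp

-- ===== VERDICT (by name: the statement is the Claim_ definition above) =====
theorem build_category_hierarchy_py_spec : Claim_equal_build_category_hierarchy_py := by
  intro category _
  unfold Spec_build_category_hierarchy_py
  exact build_category_hierarchy_py_eq category
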